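-- pv_equiv track=rewrite | github.com/FreakyRafiki/Portfolio-Repository | Ramsey-in-Graph-Theory/utils.py | count_cliques
-- ===== SOURCE A (Python) =====
-- def _edge(u, v):
--     return (u, v) if u < v else (v, u)
--
-- def count_cliques(vertices, coloring, color, size):
--     if size == 0:
--         return 1
--     if len(vertices) < size:
--         return 0
--     v = next(iter(vertices))
--     rest = vertices - {v}
--     color_neighbors = frozenset(
--         w for w in rest
--         if coloring.get(_edge(v, w)) == color
--     )
--     return (count_cliques(color_neighbors, coloring, color, size - 1)
--             + count_cliques(rest, coloring, color, size))
-- ===== SOURCE B (Python) =====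
-- def count_cliques(vertices, coloring, color, size):
--     vs = list(vertices)
--     n = len(vs)
--     get = coloring.get
--
--     def extend(i, clique, k):
--         if k == 0:
--             return 1
--         if n - i < k:
--             return 0
--         total = 0
--         for j in range(i, n):
--             v = vs[j]
--             ok = True
--             for w in clique:
--                 if get((v, w) if v < w else (w, v)) != color:
--                     ok = False
--                     break
--             if ok:
--                 total += extend(j + 1, clique + [v], k - 1)
--         return total
--
--     return extend(0, [], size)
-- ===== Notes on version B (the rewrite author's own statement) =====
-- stated objective: alternative
-- what changed: Replaced A's binary include/exclude recursion over neighbor-filtered vertex sets with a backtracking enumeration that extends a partial clique by scanning the remaining vertices and checking each candidate against the clique built so far.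
import Mathlib
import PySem

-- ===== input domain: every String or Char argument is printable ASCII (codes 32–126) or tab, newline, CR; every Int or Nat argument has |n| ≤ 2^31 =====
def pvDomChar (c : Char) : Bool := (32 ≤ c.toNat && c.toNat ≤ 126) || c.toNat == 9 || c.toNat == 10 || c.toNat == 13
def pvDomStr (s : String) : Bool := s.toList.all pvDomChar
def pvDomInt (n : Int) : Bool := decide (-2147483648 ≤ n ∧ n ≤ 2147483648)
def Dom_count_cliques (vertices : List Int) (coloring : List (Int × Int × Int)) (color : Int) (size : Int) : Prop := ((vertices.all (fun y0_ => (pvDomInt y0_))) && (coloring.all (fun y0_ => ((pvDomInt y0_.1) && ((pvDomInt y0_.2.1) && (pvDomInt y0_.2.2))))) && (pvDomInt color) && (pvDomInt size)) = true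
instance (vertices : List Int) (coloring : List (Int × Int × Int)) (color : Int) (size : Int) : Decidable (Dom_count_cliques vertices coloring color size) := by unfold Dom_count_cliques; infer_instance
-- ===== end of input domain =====

-- B replaces A's binary include/exclude recursion over neighbor-filtered vertex sets with a
-- backtracking enumeration that extends a partial clique by scanning the remaining vertices
-- (objective: alternative; equivalence is about the return value only).

-- shared helper: Python's _edge(u, v)
def pvEdge (u v : Int) : Int × Int := if u < v then (u, v) else (v, u)

-- shared helper: coloring.get(p) on the association list (first match)
def pvGetColor (coloring : List (Int × Int × Int)) (p : Int × Int) : Option Int :=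
  match coloring with
  | [] => none
  | (a, b, c) :: t => if (a, b) = p then some c else pvGetColor t p

-- shared helper: coloring.get(_edge(u, v)) == color
def pvColOK (coloring : List (Int × Int × Int)) (color : Int) (u v : Int) : Bool :=
  pvGetColor coloring (pvEdge u v) == some color

-- ===== PORT A =====
def count_cliques (vertices : List Int) (coloring : List (Int × Int × Int)) (color : Int) (size : Int) : Int :=
  if size = 0 then 1
  else if (vertices.length : Int) < size then 0
  else
    match vertices with
    | [] => 0  -- unreachable: size ≠ 0, ¬(len < size) force vertices nonempty on Pre_ inputs
    | v :: tl =>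
      -- rest = vertices - {v}
      let rest := tl.filter (fun w => w ≠ v)
      -- color_neighbors
      let neighbors := rest.filter (fun w => pvColOK coloring color v w)
      count_cliques neighbors coloring color (size - 1) + count_cliques rest coloring color size
termination_by vertices.length
decreasing_by
  all_goals simp
  · refine le_trans (List.length_filter_le _ _) ?_
    rw [List.length_unattach]
    exact le_trans (List.length_filter_le _ _) (by simp)
  · exact le_trans (List.length_filter_le _ _) (by simp)

-- ===== PORT B =====
-- compatible(v, clique)
def pvCompat (coloring : List (Int × Int × Int)) (color : Int) (v : Int) (clique : List Int) : Bool :=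
  clique.all (fun w => pvColOK coloring color v w)

mutual
-- extend(vs, clique, k)
def cqExtend (coloring : List (Int × Int × Int)) (color : Int) (vs clique : List Int) (k : Int) : Int :=
  if k = 0 then 1
  else if (vs.length : Int) < k then 0
  else cqScan coloring color vs clique k
termination_by 2 * vs.length + 1
decreasing_by
  all_goals (simp; try omega)

-- the 'for j in range(len(vs))' loop, as recursion over the suffix vs[j:]
def cqScan (coloring : List (Int × Int × Int)) (color : Int) (vs clique : List Int) (k : Int) : Int :=
  match vs with
  | [] => 0
  | v :: rest =>
    (if pvCompat coloring color v clique then cqExtend coloring color rest (clique ++ [v]) (k - 1) else 0)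
    + cqScan coloring color rest clique k
termination_by 2 * vs.length
decreasing_by
  all_goals (simp; try omega)
end

def count_cliques_alt (vertices : List Int) (coloring : List (Int × Int × Int)) (color : Int) (size : Int) : Int :=
  cqExtend coloring color vertices [] size

-- ===== PRECONDITION & SPEC =====
-- Pre_ excludes vertex lists with duplicates (Python A takes `vertices` as a set, whose List
-- encoding holds distinct elements) and negative size, on which A recurses to the empty set and
-- `next(iter(vertices))` raises StopIteration.
def Pre_count_cliques (vertices : List Int) (coloring : List (Int × Int × Int)) (color : Int) (size : Int) : Prop :=
  vertices.Nodup ∧ 0 ≤ size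
instance (vertices : List Int) (coloring : List (Int × Int × Int)) (color : Int) (size : Int) : Decidable (Pre_count_cliques vertices coloring color size) := by unfold Pre_count_cliques; infer_instance

def pvWitness_count_cliques : List Int × (List (Int × Int × Int)) × Int × Int :=
  ([0, 1, 2], [(0, 1, 5), (1, 2, 5), (0, 2, 5)], 5, 3)

def Spec_count_cliques (vertices : List Int) (coloring : List (Int × Int × Int)) (color : Int) (size : Int) (out : Int) : Prop := out = count_cliques_alt vertices coloring color size
instance (vertices : List Int) (coloring : List (Int × Int × Int)) (color : Int) (size : Int) (out : Int) : Decidable (Spec_count_cliques vertices coloring color size out) := by unfold Spec_count_cliques; infer_instance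

-- ===== CLAIM (what is proved, stated in full; the proofs are below) =====
def Claim_equal_count_cliques : Prop := ∀ (vertices : List Int) (coloring : List (Int × Int × Int)) (color : Int) (size : Int), Dom_count_cliques vertices coloring color size → Pre_count_cliques vertices coloring color size → Spec_count_cliques vertices coloring color size (count_cliques vertices coloring color size)

-- ===== LEMMAS AND PROOFS =====

lemma pvEdge_symm (u v : Int) : pvEdge u v = pvEdge v u := by
  unfold pvEdge
  split_ifs with h1 h2 h2
  · omega
  · rfl
  · rfl
  · have : u = v := by omega
    simp [this]

lemma pvColOK_symm (coloring : List (Int × Int × Int)) (color : Int) (u v : Int) :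
    pvColOK coloring color u v = pvColOK coloring color v u := by
  unfold pvColOK; rw [pvEdge_symm]

lemma count_cliques_k0 (vs : List Int) (coloring : List (Int × Int × Int)) (color : Int) :
    count_cliques vs coloring color 0 = 1 := by
  rw [count_cliques.eq_def]; simp

lemma count_cliques_zero (vs : List Int) (coloring : List (Int × Int × Int)) (color k : Int)
    (hk : k ≠ 0) (hl : (vs.length : Int) < k) : count_cliques vs coloring color k = 0 := by
  rw [count_cliques.eq_def]; simp [hk, hl]

lemma count_cliques_cons (v : Int) (tl : List Int) (coloring : List (Int × Int × Int)) (color k : Int)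
    (hk : k ≠ 0) (hlen : ¬ (((v :: tl).length : Int) < k)) :
    count_cliques (v :: tl) coloring color k
      = count_cliques ((tl.filter (fun w => w ≠ v)).filter (fun w => pvColOK coloring color v w)) coloring color (k - 1)
        + count_cliques (tl.filter (fun w => w ≠ v)) coloring color k := by
  rw [count_cliques.eq_def]
  simp only [List.length_cons] at hlen ⊢
  rw [if_neg hk, if_neg hlen]

lemma cqExtend_eq (coloring : List (Int × Int × Int)) (color : Int) (vs clique : List Int) (k : Int) :
    cqExtend coloring color vs clique k
      = if k = 0 then 1 else if (vs.length : Int) < k then 0 else cqScan coloring color vs clique k := by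
  rw [cqExtend.eq_def]

lemma cqScan_nil (coloring : List (Int × Int × Int)) (color : Int) (clique : List Int) (k : Int) :
    cqScan coloring color [] clique k = 0 := by
  rw [cqScan.eq_def]

lemma cqScan_cons (coloring : List (Int × Int × Int)) (color : Int) (v : Int) (rest clique : List Int) (k : Int) :
    cqScan coloring color (v :: rest) clique k
      = (if pvCompat coloring color v clique then cqExtend coloring color rest (clique ++ [v]) (k - 1) else 0)
        + cqScan coloring color rest clique k := by
  rw [cqScan.eq_def]

lemma pvCompat_append (coloring : List (Int × Int × Int)) (color : Int) (w v : Int) (clique : List Int) :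
    pvCompat coloring color w (clique ++ [v])
      = (pvCompat coloring color w clique && pvColOK coloring color w v) := by
  simp [pvCompat]

-- main invariant: the backtracking scan over vs with partial clique `clique` counts exactly what
-- A counts on the sublist of vs compatible with `clique`
lemma cq_main (coloring : List (Int × Int × Int)) (color : Int) : ∀ (n : ℕ),
    (∀ (vs clique : List Int) (k : Int), vs.length ≤ n → vs.Nodup → 0 ≤ k →
      cqExtend coloring color vs clique k
        = count_cliques (vs.filter (fun w => pvCompat coloring color w clique)) coloring color k)
    ∧ (∀ (vs clique : List Int) (k : Int), vs.length ≤ n → vs.Nodup → 1 ≤ k →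
      cqScan coloring color vs clique k
        = count_cliques (vs.filter (fun w => pvCompat coloring color w clique)) coloring color k) := by
  intro n
  induction n with
  | zero =>
    constructor
    · intro vs clique k hn hnd hk
      have hvs : vs = [] := List.length_eq_zero_iff.mp (Nat.le_zero.mp hn)
      subst hvs
      by_cases hk0 : k = 0
      · subst hk0; rw [cqExtend_eq, count_cliques_k0]; simp
      · rw [cqExtend_eq, count_cliques_zero _ _ _ _ hk0 (by simp; omega)]
        simp only [hk0, if_false]
        rw [if_pos (by simp; omega)]
    · intro vs clique k hn hnd hk
      have hvs : vs = [] := List.length_eq_zero_iff.mp (Nat.le_zero.mp hn)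
      subst hvs
      rw [cqScan_nil, count_cliques_zero _ _ _ _ (by omega) (by simp; omega)]
  | succ n ih =>
    obtain ⟨ihE, ihS⟩ := ih
    have hscan : ∀ (vs clique : List Int) (k : Int), vs.length ≤ n + 1 → vs.Nodup → 1 ≤ k →
        cqScan coloring color vs clique k
          = count_cliques (vs.filter (fun w => pvCompat coloring color w clique)) coloring color k := by
      intro vs clique k hn hnd hk
      match vs with
      | [] =>
        rw [cqScan_nil, count_cliques_zero _ _ _ _ (by omega) (by simp; omega)]
      | v :: rest =>
        have hrest : rest.length ≤ n := by simpa using hn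
        have hvrest : v ∉ rest := (List.nodup_cons.mp hnd).1
        have hndr : rest.Nodup := (List.nodup_cons.mp hnd).2
        rw [cqScan_cons]
        by_cases hv : pvCompat coloring color v clique = true
        · -- v enters the filtered list
          have hfilt : (v :: rest).filter (fun w => pvCompat coloring color w clique)
              = v :: rest.filter (fun w => pvCompat coloring color w clique) := by
            simp [hv]
          set f := rest.filter (fun w => pvCompat coloring color w clique) with hf
          have hfsub : ∀ w ∈ f, w ∈ rest := fun w hw => (List.mem_filter.mp hw).1
          have hEx : cqExtend coloring color rest (clique ++ [v]) (k - 1)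
              = count_cliques (rest.filter (fun w => pvCompat coloring color w (clique ++ [v]))) coloring color (k - 1) :=
            ihE rest (clique ++ [v]) (k - 1) hrest hndr (by omega)
          have hfilt2 : rest.filter (fun w => pvCompat coloring color w (clique ++ [v]))
              = f.filter (fun w => pvColOK coloring color v w) := by
            rw [hf, List.filter_filter]
            apply List.filter_congr
            intro w _
            rw [pvCompat_append, pvColOK_symm coloring color w v]
            exact Bool.and_comm _ _
          rw [hfilt, if_pos hv, hEx, hfilt2,
              ihS rest clique k hrest hndr hk, ← hf]
          by_cases hlen : (((v :: f).length : Int) < k)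
          · -- both sides are 0
            have hfl : (f.length : Int) + 1 < k := by
              simpa [Int.add_comm] using hlen
            have h1 : count_cliques (f.filter (fun w => pvColOK coloring color v w)) coloring color (k - 1) = 0 := by
              have hle := List.length_filter_le (fun w => pvColOK coloring color v w) f
              apply count_cliques_zero
              · intro hk1; omega
              · omega
            have h2 : count_cliques f coloring color k = 0 := by
              apply count_cliques_zero _ _ _ _ (by omega)
              omega
            rw [h1, h2, count_cliques_zero _ _ _ _ (by omega) hlen]
            norm_num
          · rw [count_cliques_cons v f coloring color k (by omega) hlen]
            have hrest_eq : f.filter (fun w => w ≠ v) = f := by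
              apply List.filter_eq_self.mpr
              intro w hw
              simp only [ne_eq, decide_eq_true_eq]
              intro hwv
              exact hvrest (hwv ▸ hfsub w hw)
            rw [hrest_eq]
        · have hvb : pvCompat coloring color v clique = false := by
            simpa using hv
          have hfilt : (v :: rest).filter (fun w => pvCompat coloring color w clique)
              = rest.filter (fun w => pvCompat coloring color w clique) := by
            simp [hvb]
          rw [hfilt, hvb]
          simpa using ihS rest clique k hrest hndr hk
    refine ⟨?_, hscan⟩
    intro vs clique k hn hnd hk
    by_cases hk0 : k = 0
    · subst hk0; rw [cqExtend_eq, count_cliques_k0]; simp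
    · by_cases hlen : ((vs.length : Int) < k)
      · rw [cqExtend_eq]
        have hle := List.length_filter_le (fun w => pvCompat coloring color w clique) vs
        rw [count_cliques_zero _ _ _ _ hk0 (by omega)]
        simp [hk0, hlen]
      · rw [cqExtend_eq]
        simp only [hk0, hlen, if_false]
        exact hscan vs clique k hn hnd (by omega)

lemma pvCompat_nil (coloring : List (Int × Int × Int)) (color : Int) (w : Int) :
    pvCompat coloring color w [] = true := by simp [pvCompat]

-- ===== VERDICT (by name: the statement is the Claim_ definition above) =====
theorem count_cliques_spec : Claim_equal_count_cliques := by
  intro vertices coloring color size _ hpre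
  obtain ⟨hnd, hsz⟩ := hpre
  unfold Spec_count_cliques count_cliques_alt
  have h := (cq_main coloring color vertices.length).1 vertices [] size le_rfl hnd hsz
  rw [h]
  congr 1
  simp [pvCompat_nil]
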